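-- pv_equiv track=rewrite | github.com/blindTissue/mt_final_project | preprocess_fns/process_wikitext2.py | chunk_by_topic
-- ===== SOURCE A (Python) =====
-- def chunk_by_topic(wikitext_data):
--     outputs = []
--     string_stream = ""
--     for item in wikitext_data['text']:
--         if validate_single_equals(item):
--             outputs.append(string_stream)
--             string_stream = item
--         else:
--             string_stream += item
--
--     outputs.append(string_stream)
--     return outputs[1:]
--
-- def validate_single_equals(text):
--     text = text.strip()
--     # Check if string starts and ends with =
--     starts_with_single = text.startswith('=') and not text.startswith('= =')
--     ends_with_single = text.endswith('=') and not text.endswith('= =')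
--
--     return starts_with_single and ends_with_single
-- ===== SOURCE B (Python) =====
-- def validate_single_equals(text):
--     text = text.strip()
--     starts_with_single = text.startswith('=') and not text.startswith('= =')
--     ends_with_single = text.endswith('=') and not text.endswith('= =')
--     return starts_with_single and ends_with_single
--
--
-- def chunk_by_topic(wikitext_data):
--     items = wikitext_data['text']
--     starts = [i for i, it in enumerate(items) if validate_single_equals(it)]
--     return [''.join(items[s:e]) for s, e in zip(starts, starts[1:] + [len(items)])]
-- ===== Notes on version B (the rewrite author's own statement) =====
-- stated objective: alternative
-- what changed: B replaces A's streaming accumulator (appending to a running string and shifting it on each heading) by first collecting the indices of all heading items and then joining the slice of items between consecutive heading indices.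
import Mathlib
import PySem

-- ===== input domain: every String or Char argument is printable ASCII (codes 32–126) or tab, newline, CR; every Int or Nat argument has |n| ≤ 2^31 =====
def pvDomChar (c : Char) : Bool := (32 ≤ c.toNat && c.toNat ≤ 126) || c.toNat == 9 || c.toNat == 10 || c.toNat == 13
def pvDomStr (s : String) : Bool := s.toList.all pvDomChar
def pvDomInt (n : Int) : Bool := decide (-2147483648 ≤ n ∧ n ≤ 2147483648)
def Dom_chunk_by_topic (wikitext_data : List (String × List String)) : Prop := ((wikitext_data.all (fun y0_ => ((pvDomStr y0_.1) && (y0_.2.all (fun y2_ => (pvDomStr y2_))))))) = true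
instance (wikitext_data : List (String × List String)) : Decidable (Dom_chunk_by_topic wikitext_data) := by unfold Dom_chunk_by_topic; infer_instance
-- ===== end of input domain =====

-- B replaces A's streaming string accumulator by collecting heading indices and joining
-- slices between consecutive headings (objective: alternative decomposition, same cost).

-- ===== PORT A =====
-- shared module helper, used verbatim by both Python versions
def validate_single_equals (text : String) : Bool :=
  let t := PySem.Str.strip text
  let starts_with_single := PySem.Str.startswith t "=" && !(PySem.Str.startswith t "= =")
  let ends_with_single := PySem.Str.endswith t "=" && !(PySem.Str.endswith t "= =")
  starts_with_single && ends_with_single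

def chunk_by_topic (wikitext_data : List (String × List String)) : List String :=
  match List.lookup "text" wikitext_data with
  | none => []   -- Python raises KeyError here; excluded by Pre_chunk_by_topic
  | some items =>
    let r := items.foldl (fun (st : List String × String) item =>
      if validate_single_equals item then (st.1 ++ [st.2], item)
      else (st.1, PySem.Str.join "" [st.2, item])) ([], "")
    PySem.List.slice (r.1 ++ [r.2]) (some 1) none

-- ===== PORT B =====
def chunk_by_topic_alt (wikitext_data : List (String × List String)) : List String :=
  match List.lookup "text" wikitext_data with
  | none => []   -- Python raises KeyError here; excluded by Pre_chunk_by_topic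
  | some items =>
    let starts := (PySem.List.enumerate items).filterMap
      (fun p => if validate_single_equals p.2 then some p.1 else none)
    (starts.zip (PySem.List.slice starts (some 1) none ++ [(items.length : Int)])).map
      (fun p => PySem.Str.join "" (PySem.List.slice items (some p.1) (some p.2)))

-- ===== PRECONDITION & SPEC =====
-- Pre_ excludes exactly the inputs without a 'text' key, on which Python A raises KeyError.
def Pre_chunk_by_topic (wikitext_data : List (String × List String)) : Prop :=
  "text" ∈ wikitext_data.map Prod.fst
instance (wikitext_data : List (String × List String)) : Decidable (Pre_chunk_by_topic wikitext_data) := by unfold Pre_chunk_by_topic; infer_instance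
def pvWitness_chunk_by_topic : (List (String × List String)) := [("text", ["= a =", "x", "= b =", "y"])]

def Spec_chunk_by_topic (wikitext_data : List (String × List String)) (out : List String) : Prop := out = chunk_by_topic_alt wikitext_data
instance (wikitext_data : List (String × List String)) (out : List String) : Decidable (Spec_chunk_by_topic wikitext_data out) := by unfold Spec_chunk_by_topic; infer_instance

-- ===== CLAIM (what is proved, stated in full; the proofs are below) =====
def Claim_equal_chunk_by_topic : Prop := ∀ (wikitext_data : List (String × List String)), Dom_chunk_by_topic wikitext_data → Pre_chunk_by_topic wikitext_data → Spec_chunk_by_topic wikitext_data (chunk_by_topic wikitext_data)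

-- ===== LEMMAS AND PROOFS =====

-- concatenation of item strings, as lists of chars
def flatS (xs : List String) : List Char := (xs.map String.toList).flatten

-- A's loop, abstracted: outputs emitted (plus the final stream) from current stream s
def runA (xs : List String) (s : List Char) : List (List Char) :=
  match xs with
  | [] => [s]
  | x :: t => if validate_single_equals x then s :: runA t x.toList
              else runA t (s ++ x.toList)

-- heading positions, structurally
def startsN (xs : List String) : List Nat :=
  match xs with
  | [] => []
  | x :: t => (if validate_single_equals x then [0] else []) ++ (startsN t).map (· + 1)

-- consecutive (start, end) pairs: zip S (S.drop 1 ++ [n]), recursively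
def pairsN : List Nat → Nat → List (Nat × Nat)
  | [], _ => []
  | a :: rest, n => (a, rest.headD n) :: pairsN rest n

-- B's value, at the char-list level with Nat indices
def chunksIdx (xs : List String) : List (List Char) :=
  (pairsN (startsN xs) xs.length).map
    (fun p => flatS ((xs.drop p.1).take (p.2 - p.1)))

theorem join_nil_eq_flatten (ls : List (List Char)) : PySem.Chars.join [] ls = ls.flatten := by
  match ls with
  | [] => simp [PySem.Chars.join_nil]
  | [p] => simp [PySem.Chars.join_singleton]
  | p :: q :: rest =>
      rw [PySem.Chars.join_cons_cons, join_nil_eq_flatten (q :: rest)]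
      simp

theorem pairsN_shift (S : List Nat) (n : Nat) :
    pairsN (S.map (· + 1)) (n + 1) = (pairsN S n).map (fun p => (p.1 + 1, p.2 + 1)) := by
  induction S with
  | nil => simp [pairsN]
  | cons a rest ih =>
      simp only [List.map_cons, pairsN, ih, List.map_cons]
      congr 1
      cases rest <;> simp

theorem pairsN_zip_cast (S : List Nat) (n : Nat) :
    ((S.map (fun k : Nat => (k : Int))).zip
        ((S.map (fun k : Nat => (k : Int))).tail ++ [(n : Int)]))
      = (pairsN S n).map (fun p => ((p.1 : Int), (p.2 : Int))) := by
  induction S with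
  | nil => simp [pairsN]
  | cons a rest ih =>
      cases rest with
      | nil => simp [pairsN]
      | cons b rest' =>
          simp only [List.map_cons, List.tail_cons] at ih ⊢
          simp only [List.cons_append, List.zip_cons_cons]
          rw [ih]
          simp [pairsN]

theorem no_heads_runA (xs : List String) (h : startsN xs = []) (c : List Char) :
    runA xs c = [c ++ flatS xs] := by
  induction xs generalizing c with
  | nil => simp [runA, flatS]
  | cons y ys ih =>
      unfold startsN at h
      by_cases hv : validate_single_equals y
      · simp [hv] at h
      · simp [hv] at h
        rw [runA]
        simp only [hv, Bool.false_eq_true, ite_false]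
        rw [ih h]
        simp [flatS]

theorem head_runA (t : List String) : ∀ (c : List Char) (k : Nat) (r : List Nat),
    startsN t = k :: r → runA t c = (c ++ flatS (t.take k)) :: (runA t c).tail := by
  induction t with
  | nil => intro c k r h; simp [startsN] at h
  | cons y ys ih =>
      intro c k r h
      unfold startsN at h
      by_cases hv : validate_single_equals y
      · simp [hv] at h
        rw [runA]
        simp [hv, ← h.1, flatS]
      · simp [hv] at h
        obtain ⟨k', r', hS, hk⟩ : ∃ k' r', startsN ys = k' :: r' ∧ k = k' + 1 := by
          cases hS : startsN ys with
          | nil => rw [hS] at h; simp at h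
          | cons a b => rw [hS] at h; simp at h; exact ⟨a, b, rfl, h.1.symm⟩
        rw [runA]
        simp only [hv, Bool.false_eq_true, ite_false]
        rw [ih (c ++ y.toList) k' r' hS]
        subst hk
        simp [flatS]

theorem main_runA (xs : List String) (c : List Char) :
    (runA xs c).tail = chunksIdx xs := by
  induction xs generalizing c with
  | nil => simp [runA, chunksIdx, startsN, pairsN]
  | cons x t ih =>
      by_cases hv : validate_single_equals x
      · rw [runA]; simp only [hv, ite_true, List.tail_cons]
        cases hS : startsN t with
        | nil =>
            rw [no_heads_runA t hS x.toList]
            simp [chunksIdx, startsN, hS, hv, pairsN, flatS, List.take_of_length_le]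
        | cons k r =>
            rw [head_runA t x.toList k r hS, ih x.toList]
            have hs1 : startsN (x :: t) = 0 :: (k :: r).map (· + 1) := by
              simp [startsN, hv, hS]
            simp only [chunksIdx, hs1, List.length_cons, pairsN, List.map_cons,
              List.headD_cons, pairsN_shift, List.map_map, hS]
            congr 1
            simp [flatS]
      · rw [runA]; simp only [hv, Bool.false_eq_true, ite_false]
        rw [ih (c ++ x.toList)]
        have hs1 : startsN (x :: t) = (startsN t).map (· + 1) := by
          simp [startsN, hv]
        simp only [chunksIdx, hs1, List.length_cons, pairsN_shift, List.map_map]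
        apply List.map_congr_left
        intro p _
        simp [Function.comp, flatS]

theorem foldA_eq (xs : List String) (acc : List String) (s : String) :
    ((xs.foldl (fun (st : List String × String) item =>
        if validate_single_equals item then (st.1 ++ [st.2], item)
        else (st.1, PySem.Str.join "" [st.2, item])) (acc, s)).1 ++
      [(xs.foldl (fun (st : List String × String) item =>
        if validate_single_equals item then (st.1 ++ [st.2], item)
        else (st.1, PySem.Str.join "" [st.2, item])) (acc, s)).2]).map String.toList
      = acc.map String.toList ++ runA xs s.toList := by
  induction xs generalizing acc s with
  | nil => simp [runA]
  | cons x t ih =>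
      by_cases hv : validate_single_equals x
      · simp only [List.foldl_cons, hv, ite_true, runA]
        rw [ih]
        simp
      · simp only [List.foldl_cons, hv, Bool.false_eq_true, ite_false, runA]
        rw [ih]
        have : (PySem.Str.join "" [s, x]).toList = s.toList ++ x.toList := by
          rw [PySem.Str.toList_join]
          simp [join_nil_eq_flatten]
        simp [this]

theorem starts_enum (xs : List String) (s : Int) :
    ((PySem.List.enumerate xs s).filterMap
      (fun p => if validate_single_equals p.2 then some p.1 else none))
      = (startsN xs).map (fun k : Nat => s + (k : Int)) := by
  induction xs generalizing s with
  | nil => simp [PySem.List.enumerate, startsN]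
  | cons x t ih =>
      rw [PySem.List.enumerate_cons]
      by_cases hv : validate_single_equals x
      · simp only [List.filterMap_cons, hv, ite_true, startsN]
        rw [ih (s + 1)]
        simp only [List.singleton_append, List.map_cons, List.map_map]
        congr 1
        · simp
        · apply List.map_congr_left; intro k _; simp only [Function.comp]; push_cast; ring
      · simp only [List.filterMap_cons, hv, Bool.false_eq_true, ite_false, startsN]
        rw [ih (s + 1)]
        simp only [List.nil_append, List.map_map]
        apply List.map_congr_left; intro k _; simp only [Function.comp]; push_cast; ring

theorem toList_map_injective {l₁ l₂ : List String}
    (h : l₁.map String.toList = l₂.map String.toList) : l₁ = l₂ := by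
  have : Function.Injective String.toList := fun a b hab => String.toList_inj.mp hab
  exact List.map_injective_iff.mpr this h

-- ===== VERDICT (by name: the statement is the Claim_ definition above) =====
theorem chunk_by_topic_spec : Claim_equal_chunk_by_topic := by
  intro d _ _
  unfold Spec_chunk_by_topic chunk_by_topic chunk_by_topic_alt
  cases hL : List.lookup "text" d with
  | none => rfl
  | some items =>
      simp only []
      apply toList_map_injective
      -- A side
      rw [PySem.List.slice_from_one, List.map_tail]
      rw [foldA_eq items [] ""]
      simp only [List.map_nil, List.nil_append]
      rw [main_runA items _]
      -- B side
      rw [starts_enum items 0]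
      have hc : (fun k : Nat => (0 : Int) + (k : Int)) = (fun k : Nat => (k : Int)) := by
        funext k; ring
      rw [hc, PySem.List.slice_from_one, pairsN_zip_cast, List.map_map,
        List.map_map]
      unfold chunksIdx
      apply List.map_congr_left
      intro p hp
      simp only [Function.comp]
      rw [PySem.List.slice_natCast]
      rw [PySem.Str.toList_join,
        show ("" : String).toList = ([] : List Char) from rfl, join_nil_eq_flatten]
      simp [flatS]
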